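-- pv_equiv track=rewrite | github.com/tenstorrent/tt-forge-models | crystal/causal_lm/pytorch/loader.py | _get_device_map
-- ===== SOURCE A (Python) =====
-- def _get_device_map(n_layers, devices):
--     layers_per_device = n_layers // len(devices)
--     remainder = n_layers % len(devices)
--     device_map = {}
--     layer_idx = 0
--     for i, device in enumerate(devices):
--         n = layers_per_device + (1 if i < remainder else 0)
--         for _ in range(n):
--             device_map[layer_idx] = device
--             layer_idx += 1
--     return device_map
-- ===== SOURCE B (Python) =====
-- def _get_device_map(n_layers, devices):
--     lpd = n_layers // len(devices)
--     rem = n_layers % len(devices)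
--     cutoff = rem * (lpd + 1)
--     return {
--         i: (devices[i // (lpd + 1)] if i < cutoff else devices[rem + (i - cutoff) // lpd])
--         for i in range(n_layers)
--     }
-- ===== Notes on version B (the rewrite author's own statement) =====
-- stated objective: simpler
-- what changed: Replaced A's nested per-device/per-count loops with a single dict comprehension over range(n_layers) that computes each layer's owning device by closed-form floor-division arithmetic.
import Mathlib
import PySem

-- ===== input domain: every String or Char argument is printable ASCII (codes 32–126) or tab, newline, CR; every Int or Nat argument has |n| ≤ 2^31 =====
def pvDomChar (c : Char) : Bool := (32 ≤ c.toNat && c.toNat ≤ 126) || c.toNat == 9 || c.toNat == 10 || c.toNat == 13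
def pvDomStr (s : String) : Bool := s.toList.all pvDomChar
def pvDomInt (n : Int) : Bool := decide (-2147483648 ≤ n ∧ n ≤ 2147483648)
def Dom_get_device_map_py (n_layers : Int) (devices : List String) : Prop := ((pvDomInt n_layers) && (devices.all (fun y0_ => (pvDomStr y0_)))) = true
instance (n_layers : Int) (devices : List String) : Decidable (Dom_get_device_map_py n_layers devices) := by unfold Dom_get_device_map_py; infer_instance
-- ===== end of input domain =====

-- B replaces A's nested per-device/per-count loops by one flat pass that assigns each
-- layer its device by closed-form arithmetic (objective: simpler decomposition).

-- ===== PORT A =====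
-- literal transliteration of A's nested loops: fold over enumerate(devices), inner
-- fold over range(n) inserting consecutive layer indices into the dict
def get_device_map_py (n_layers : Int) (devices : List String) : List (Int × String) :=
  let layers_per_device := PySem.Int.floordiv n_layers (PySem.List.len devices)
  let remainder := PySem.Int.mod n_layers (PySem.List.len devices)
  let st := (PySem.List.enumerate devices 0).foldl
    (fun (st : PySem.Dict Int String × Int) p =>
      let n := layers_per_device + (if p.1 < remainder then 1 else 0)
      (PySem.List.pyRange 0 n 1).foldl
        (fun st2 _ => (st2.1.insert st2.2 p.2, st2.2 + 1)) st)
    (PySem.Dict.empty, 0)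
  st.1.items

-- ===== PORT B =====
-- literal transliteration of Source B's dict comprehension; devices[...] is pyGetD, exact
-- here because under Pre_ the computed index is always in range (proved below), so B's
-- Python never reaches an index where it would raise
def get_device_map_py_alt (n_layers : Int) (devices : List String) : List (Int × String) :=
  let lpd := PySem.Int.floordiv n_layers (PySem.List.len devices)
  let rem := PySem.Int.mod n_layers (PySem.List.len devices)
  let cutoff := rem * (lpd + 1)
  ((PySem.List.pyRange 0 n_layers 1).foldl
    (fun (d : PySem.Dict Int String) i =>
      d.insert i (if i < cutoff
        then PySem.List.pyGetD devices (PySem.Int.floordiv i (lpd + 1)) ""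
        else PySem.List.pyGetD devices (rem + PySem.Int.floordiv (i - cutoff) lpd) ""))
    PySem.Dict.empty).items

-- ===== PRECONDITION & SPEC =====
-- Pre_ excludes only devices = [], where A (and B alike) raise ZeroDivisionError
def Pre_get_device_map_py (n_layers : Int) (devices : List String) : Prop := devices ≠ []
instance (n_layers : Int) (devices : List String) : Decidable (Pre_get_device_map_py n_layers devices) := by unfold Pre_get_device_map_py; infer_instance
def pvWitness_get_device_map_py : Int × List String := (5, ["a", "b"])

def Spec_get_device_map_py (n_layers : Int) (devices : List String) (out : List (Int × String)) : Prop := out = get_device_map_py_alt n_layers devices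
instance (n_layers : Int) (devices : List String) (out : List (Int × String)) : Decidable (Spec_get_device_map_py n_layers devices out) := by unfold Spec_get_device_map_py; infer_instance

-- ===== CLAIM (what is proved, stated in full; the proofs are below) =====
def Claim_equal_get_device_map_py : Prop := ∀ (n_layers : Int) (devices : List String), Dom_get_device_map_py n_layers devices → Pre_get_device_map_py n_layers devices → Spec_get_device_map_py n_layers devices (get_device_map_py n_layers devices)

-- ===== LEMMAS AND PROOFS =====

-- the block list both sides are proved equal to: for each device (from position s,
-- layer counter c) a run of consecutive layer indices paired with that device
def pvBlocks (lpd rem : Int) : List String → Int → Int → List (Int × String)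
  | [], _, _ => []
  | x :: ds, s, c =>
    (PySem.List.pyRange c (c + (lpd + (if s < rem then 1 else 0))) 1).map (fun j => (j, x))
      ++ pvBlocks lpd rem ds (s + 1) (c + (lpd + (if s < rem then 1 else 0)))

-- A's inner loop: inserting L.length fresh consecutive keys starting at c appends
lemma pv_inner (dev : String) (L : List Int) : ∀ (d : PySem.Dict Int String) (c : Int),
    (∀ k ∈ d.keys, k < c) →
    L.foldl (fun st2 (_ : Int) => (st2.1.insert st2.2 dev, st2.2 + 1)) (d, c)
      = (PySem.Dict.mk (d.items ++ (PySem.List.pyRange c (c + L.length) 1).map (fun j => (j, dev))),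
         c + L.length) := by
  induction L with
  | nil =>
    intro d c h
    simp [PySem.List.pyRange_one_eq_nil (by omega : (c:Int) ≤ c)]
  | cons a t ih =>
    intro d c h
    have hnc : d.contains c = false := by
      by_contra hc
      have : c ∈ d.keys := (PySem.Dict.contains_iff_mem_keys d c).1 (by simpa using hc)
      exact absurd (h c this) (by omega)
    have hins : d.insert c dev = PySem.Dict.mk (d.items ++ [(c, dev)]) := by
      apply PySem.Dict.ext
      simp [PySem.Dict.items_insert_of_not_contains d dev hnc]
    simp only [List.foldl_cons]
    rw [ih (d.insert c dev) (c + 1) (by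
      intro k hk
      rcases (PySem.Dict.mem_keys_insert d c k dev).1 hk with rfl | hk2
      · omega
      · have := h k hk2; omega)]
    rw [hins]
    have hsplit : PySem.List.pyRange c (c + ((a :: t).length : Int)) 1
        = c :: PySem.List.pyRange (c+1) (c + ((a :: t).length : Int)) 1 :=
      PySem.List.pyRange_one_cons (by simp)
    rw [hsplit]
    simp
    rw [show (c + 1 + (t.length:Int)) = c + ((t.length:Int) + 1) from by ring]
    exact ⟨rfl, rfl⟩

-- A's outer loop over enumerate(devices) produces the blocks, appended to the dict so far
lemma pv_outer (lpd rem : Int) (hlpd : 0 ≤ lpd) (ds : List String) : ∀ (s c : Int) (d : PySem.Dict Int String),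
    (∀ k ∈ d.keys, k < c) →
    ((PySem.List.enumerate ds s).foldl
      (fun (st : PySem.Dict Int String × Int) p =>
        (PySem.List.pyRange 0 (lpd + (if p.1 < rem then 1 else 0)) 1).foldl
          (fun st2 _ => (st2.1.insert st2.2 p.2, st2.2 + 1)) st) (d, c)).1.items
      = d.items ++ pvBlocks lpd rem ds s c := by
  induction ds with
  | nil => intro s c d h; simp [PySem.List.enumerate_nil, pvBlocks]
  | cons x t ih =>
    intro s c d h
    rw [PySem.List.enumerate_cons]
    simp only [List.foldl_cons]
    set m : Int := lpd + (if s < rem then 1 else 0) with hm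
    have hm0 : 0 ≤ m := by rw [hm]; split_ifs <;> omega
    have hlen : ((PySem.List.pyRange 0 m 1).length : Int) = m := by
      rw [PySem.List.length_pyRange_one]; omega
    have := pv_inner x (PySem.List.pyRange 0 m 1) d c h
    rw [hlen] at this
    rw [this]
    rw [ih (s+1) (c+m) (PySem.Dict.mk (d.items ++ (PySem.List.pyRange c (c + m) 1).map (fun j => (j, x)))) ?hb]
    case hb =>
      intro k hk
      simp only [PySem.Dict.keys, List.map_append, List.mem_append, List.map_map] at hk
      rcases hk with hk | hk
      · have := h k (by simpa [PySem.Dict.keys] using hk)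
        omega
      · have : k ∈ PySem.List.pyRange c (c + m) 1 := by
          simpa using hk
        have := (PySem.List.mem_pyRange_one).1 this
        omega
    rw [pvBlocks]
    simp only [← hm]
    simp

-- B's closed-form device choice, mapped over the remaining layer range, produces the
-- same blocks: each layer j of device s's run satisfies B's floor-division formula
lemma pv_bside (devices : List String) (n_layers lpd rem : Int)
    (hlpd : 0 ≤ lpd) (hrem0 : 0 ≤ rem) (hremk : rem < (devices.length : Int))
    (hn : (devices.length : Int) * lpd + rem = n_layers) :
    ∀ (ds : List String) (s : Nat), devices.drop s = ds →
    (PySem.List.pyRange ((s : Int) * lpd + min (s : Int) rem) n_layers 1).map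
      (fun i => (i, if i < rem * (lpd + 1)
        then PySem.List.pyGetD devices (PySem.Int.floordiv i (lpd + 1)) ""
        else PySem.List.pyGetD devices (rem + PySem.Int.floordiv (i - rem * (lpd + 1)) lpd) ""))
      = pvBlocks lpd rem ds s ((s : Int) * lpd + min (s : Int) rem) := by
  intro ds
  induction ds with
  | nil =>
    intro s hdrop
    have hks : devices.length ≤ s := by
      by_contra hlt
      have := List.drop_eq_nil_iff.1 hdrop
      omega
    have : n_layers ≤ (s : Int) * lpd + min (s : Int) rem := by
      have h1 : ((devices.length : Int)) * lpd ≤ (s : Int) * lpd :=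
        mul_le_mul_of_nonneg_right (by exact_mod_cast hks) hlpd
      have h2 : min (s : Int) rem = rem := by omega
      nlinarith
    rw [PySem.List.pyRange_one_eq_nil this, List.map_nil, pvBlocks]
  | cons x t ih =>
    intro s hdrop
    have hsx : devices[s]? = some x := by
      rw [← List.head?_drop, hdrop]; rfl
    have hslen : s < devices.length := by
      by_contra hge
      rw [List.drop_eq_nil_iff.2 (by omega)] at hdrop
      exact absurd hdrop (by simp)
    set c : Int := (s : Int) * lpd + min (s : Int) rem with hc
    set m : Int := lpd + (if (s : Int) < rem then 1 else 0) with hm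
    have hm0 : 0 ≤ m := by rw [hm]; split_ifs <;> omega
    have hnext : ((s + 1 : Nat) : Int) * lpd + min ((s + 1 : Nat) : Int) rem = c + m := by
      push_cast
      rw [hc, hm]
      have : ((s : Int) + 1) * lpd = (s : Int) * lpd + lpd := by ring
      rw [this]
      split_ifs <;> omega
    have hub : c + m ≤ n_layers := by
      rw [← hnext, ← hn]
      have h1 : ((s : Int) + 1) * lpd ≤ (devices.length : Int) * lpd :=
        mul_le_mul_of_nonneg_right (by exact_mod_cast hslen) hlpd
      push_cast
      omega
    rw [PySem.List.pyRange_one_append c (c + m) n_layers (by omega) hub, List.map_append]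
    rw [pvBlocks]
    congr 1
    · -- a layer j in [c, c+m) belongs to device s, and B's formula indexes device s
      apply List.map_congr_left
      intro j hj
      have hjb := (PySem.List.mem_pyRange_one).1 hj
      have hdev : ∀ (i : Int), i = (s : Int) →
          PySem.List.pyGetD devices i "" = x := by
        intro i hi
        rw [hi, PySem.List.pyGetD_natCast, List.getD_eq_getElem?_getD, hsx]
        rfl
      by_cases hcase : (s : Int) < rem
      · have hmval : m = lpd + 1 := by rw [hm]; simp [hcase]
        have hmin : min (s : Int) rem = (s : Int) := by omega
        have hcval : c = (s : Int) * (lpd + 1) := by rw [hc, hmin]; ring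
        have hlt : j < rem * (lpd + 1) := by
          have : ((s : Int) + 1) * (lpd + 1) ≤ rem * (lpd + 1) :=
            mul_le_mul_of_nonneg_right (by omega) (by omega)
          nlinarith
        rw [if_pos hlt]
        have hq : PySem.Int.floordiv j (lpd + 1) = (s : Int) := by
          rw [PySem.Int.floordiv_eq_iff_of_pos (by omega)]
          constructor
          · nlinarith
          · nlinarith
        rw [hdev _ hq]
      · have hmval : m = lpd := by rw [hm]; simp [hcase]
        have hmin : min (s : Int) rem = rem := by omega
        have hcval : c = (s : Int) * lpd + rem := by rw [hc, hmin]
        have hlpd1 : 0 < lpd := by omega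
        have hge : ¬ j < rem * (lpd + 1) := by
          have : rem * lpd ≤ (s : Int) * lpd := mul_le_mul_of_nonneg_right (by omega) hlpd
          nlinarith
        rw [if_neg hge]
        have hq : PySem.Int.floordiv (j - rem * (lpd + 1)) lpd = (s : Int) - rem := by
          rw [PySem.Int.floordiv_eq_iff_of_pos hlpd1]
          constructor
          · nlinarith
          · nlinarith
        rw [hq, hdev (rem + ((s : Int) - rem)) (by ring)]
    · have := ih (s + 1) (by rw [← List.tail_drop, hdrop]; rfl)
      rw [hnext] at this
      exact this

-- ===== VERDICT (by name: the statement is the Claim_ definition above) =====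
theorem get_device_map_py_spec : Claim_equal_get_device_map_py := by
  intro n_layers devices _ hpre
  unfold Spec_get_device_map_py
  unfold Pre_get_device_map_py at hpre
  have hk : 0 < (devices.length : Int) := by
    have : devices.length ≠ 0 := fun h => hpre (List.eq_nil_of_length_eq_zero h)
    omega
  set lpd : Int := PySem.Int.floordiv n_layers (devices.length : Int) with hlpd_def
  set rem : Int := PySem.Int.mod n_layers (devices.length : Int) with hrem_def
  have hrem0 : 0 ≤ rem := PySem.Int.mod_nonneg n_layers hk
  have hremk : rem < (devices.length : Int) := PySem.Int.mod_lt n_layers hk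
  have hdiv : lpd * (devices.length : Int) + rem = n_layers :=
    PySem.Int.floordiv_mul_add_mod n_layers (devices.length : Int)
  simp only [get_device_map_py, get_device_map_py_alt, PySem.List.len_eq, ← hlpd_def, ← hrem_def]
  by_cases hneg : n_layers < 0
  · -- negative n_layers: both sides build the empty dict
    have hlpdneg : lpd + 1 ≤ 0 := by nlinarith
    have hstep : (fun (st : PySem.Dict Int String × Int) (p : Int × String) =>
        (PySem.List.pyRange 0 (lpd + (if p.1 < rem then 1 else 0)) 1).foldl
          (fun st2 _ => (st2.1.insert st2.2 p.2, st2.2 + 1)) st)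
        = fun st _ => st := by
      funext st p
      rw [PySem.List.pyRange_one_eq_nil (by split_ifs <;> omega)]
      rfl
    rw [hstep, List.foldl_fixed, PySem.List.pyRange_one_eq_nil (by omega : n_layers ≤ 0)]
    rfl
  · rw [not_lt] at hneg
    have hlpd : 0 ≤ lpd := by nlinarith
    -- A's nested loops produce the blocks
    rw [pv_outer lpd rem hlpd devices 0 0 PySem.Dict.empty (by simp [PySem.Dict.keys_empty])]
    -- B's flat loop over fresh distinct keys produces its per-layer pairs
    rw [PySem.Dict.items_foldl_insert_fresh (PySem.List.pyRange 0 n_layers 1)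
      (fun i => i)
      (fun i => (if i < rem * (lpd + 1)
        then PySem.List.pyGetD devices (PySem.Int.floordiv i (lpd + 1)) ""
        else PySem.List.pyGetD devices (rem + PySem.Int.floordiv (i - rem * (lpd + 1)) lpd) ""))
      PySem.Dict.empty
      (by intro a _; simp [PySem.Dict.contains_empty])
      (by simpa using PySem.List.nodup_pyRange_one 0 n_layers)]
    have hb := pv_bside devices n_layers lpd rem hlpd hrem0 hremk (by linarith [hdiv, mul_comm lpd (devices.length : Int)]) devices 0 (by simp)
    simp only [Nat.cast_zero, zero_mul, min_eq_left hrem0, zero_add] at hb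
    rw [← hb]
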